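-- pv_equiv track=rewrite | github.com/robwec/shadowverse-worlds-beyond-set-pricer | shadowverse-set-pricer.py | calculateCollectionVialCompletionCost
-- ===== SOURCE A (Python) =====
-- bronze_craft_value = 50
--
-- silver_craft_value = 90
--
-- gold_craft_value = 750
--
-- legendary_craft_value = 3500
--
-- def calculateCollectionVialCompletionCost(mycollection, mysetcardlist, use_1x_legendaries_limit=False):
-- 	totalvialcraftcost = 0
--
-- 	n_missing_bronzes = 0
-- 	set_bronzes = [x for x in mysetcardlist if 'bronze' in x]
-- 	for i in range(len(set_bronzes)):
-- 		thisbronze = set_bronzes[i]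
-- 		n_missing_bronzes += max(3 - mycollection[thisbronze], 0)
--
-- 	totalvialcraftcost += bronze_craft_value*n_missing_bronzes
--
-- 	n_missing_silvers = 0
-- 	set_silvers = [x for x in mysetcardlist if 'silver' in x]
-- 	for i in range(len(set_silvers)):
-- 		thissilver = set_silvers[i]
-- 		n_missing_silvers += max(3 - mycollection[thissilver], 0)
--
-- 	totalvialcraftcost += silver_craft_value*n_missing_silvers
--
-- 	n_missing_golds = 0
-- 	set_golds = [x for x in mysetcardlist if 'gold' in x]
-- 	for i in range(len(set_golds)):
-- 		thisgold = set_golds[i]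
-- 		n_missing_golds += max(3 - mycollection[thisgold], 0)
--
-- 	totalvialcraftcost += gold_craft_value*n_missing_golds
--
-- 	n_missing_legendaries = 0
-- 	set_legendaries = [x for x in mysetcardlist if 'legendary' in x]
-- 	for i in range(len(set_legendaries)):
-- 		thislegendary = set_legendaries[i]
-- 		if use_1x_legendaries_limit:
-- 			n_missing_legendaries += max(1 - mycollection[thislegendary], 0) ##use this if you're OK with just 1x of each legendary
-- 		else:
-- 			n_missing_legendaries += max(3 - mycollection[thislegendary], 0) ##use this for 3x everything
--
-- 	totalvialcraftcost += legendary_craft_value*n_missing_legendaries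
--
-- 	return totalvialcraftcost
-- ===== SOURCE B (Python) =====
-- bronze_craft_value = 50
-- silver_craft_value = 90
-- gold_craft_value = 750
-- legendary_craft_value = 3500
--
-- def calculateCollectionVialCompletionCost(mycollection, mysetcardlist, use_1x_legendaries_limit=False):
-- 	# Single pass over the card list; independent substring tests so a name
-- 	# matching several rarities is counted for each, exactly as the four passes do.
-- 	total = 0
-- 	legendary_need = 1 if use_1x_legendaries_limit else 3
-- 	for x in mysetcardlist:
-- 		if 'bronze' in x:
-- 			total += bronze_craft_value * max(3 - mycollection[x], 0)
-- 		if 'silver' in x: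
-- 			total += silver_craft_value * max(3 - mycollection[x], 0)
-- 		if 'gold' in x:
-- 			total += gold_craft_value * max(3 - mycollection[x], 0)
-- 		if 'legendary' in x:
-- 			total += legendary_craft_value * max(legendary_need - mycollection[x], 0)
-- 	return total
-- ===== Notes on version B (the rewrite author's own statement) =====
-- stated objective: simpler
-- what changed: Replaces A's four separate filter-then-loop passes (one per rarity) with a single loop over the card list that applies four independent substring tests per card.
import Mathlib
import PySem

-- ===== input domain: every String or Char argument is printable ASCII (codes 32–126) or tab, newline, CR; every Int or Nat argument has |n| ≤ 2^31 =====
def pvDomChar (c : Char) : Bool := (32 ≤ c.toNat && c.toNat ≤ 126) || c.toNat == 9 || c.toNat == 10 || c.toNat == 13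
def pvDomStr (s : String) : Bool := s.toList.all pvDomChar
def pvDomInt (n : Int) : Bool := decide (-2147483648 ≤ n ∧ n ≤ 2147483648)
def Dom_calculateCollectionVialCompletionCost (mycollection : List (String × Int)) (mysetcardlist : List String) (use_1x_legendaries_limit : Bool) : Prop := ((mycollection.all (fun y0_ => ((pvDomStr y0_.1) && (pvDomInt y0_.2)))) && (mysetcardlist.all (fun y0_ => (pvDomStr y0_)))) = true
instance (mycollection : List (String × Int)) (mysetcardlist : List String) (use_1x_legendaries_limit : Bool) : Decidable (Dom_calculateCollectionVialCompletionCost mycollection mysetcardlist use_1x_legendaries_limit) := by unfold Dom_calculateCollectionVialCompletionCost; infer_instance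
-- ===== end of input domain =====

-- B replaces A's four filter-then-loop passes with one loop over the card list
-- applying four independent substring tests per card (simpler decomposition, same cost class).

-- ===== PORT A =====
-- Four passes: filter the set list by rarity substring, then loop-accumulate missing copies.
def calculateCollectionVialCompletionCost (mycollection : List (String × Int)) (mysetcardlist : List String) (use_1x_legendaries_limit : Bool) : Int :=
  let d := PySem.Dict.mk mycollection
  let totalvialcraftcost : Int := 0
  let set_bronzes := mysetcardlist.filter (fun x => PySem.Str.isIn "bronze" x)
  let n_missing_bronzes := set_bronzes.foldl (fun acc x => acc + max (3 - d.getD x 0) 0) 0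
  let totalvialcraftcost := totalvialcraftcost + 50 * n_missing_bronzes
  let set_silvers := mysetcardlist.filter (fun x => PySem.Str.isIn "silver" x)
  let n_missing_silvers := set_silvers.foldl (fun acc x => acc + max (3 - d.getD x 0) 0) 0
  let totalvialcraftcost := totalvialcraftcost + 90 * n_missing_silvers
  let set_golds := mysetcardlist.filter (fun x => PySem.Str.isIn "gold" x)
  let n_missing_golds := set_golds.foldl (fun acc x => acc + max (3 - d.getD x 0) 0) 0
  let totalvialcraftcost := totalvialcraftcost + 750 * n_missing_golds
  let set_legendaries := mysetcardlist.filter (fun x => PySem.Str.isIn "legendary" x)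
  let n_missing_legendaries := set_legendaries.foldl
    (fun acc x => acc + (if use_1x_legendaries_limit then max (1 - d.getD x 0) 0 else max (3 - d.getD x 0) 0)) 0
  totalvialcraftcost + 3500 * n_missing_legendaries

-- ===== PORT B =====
-- One pass; mycollection[x] under Pre_ is an exact lookup (getD's default is never reached).
def calculateCollectionVialCompletionCost_alt (mycollection : List (String × Int)) (mysetcardlist : List String) (use_1x_legendaries_limit : Bool) : Int :=
  let d := PySem.Dict.mk mycollection
  let legendary_need : Int := if use_1x_legendaries_limit then 1 else 3
  mysetcardlist.foldl (fun total x =>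
    let total := if PySem.Str.isIn "bronze" x then total + 50 * max (3 - d.getD x 0) 0 else total
    let total := if PySem.Str.isIn "silver" x then total + 90 * max (3 - d.getD x 0) 0 else total
    let total := if PySem.Str.isIn "gold" x then total + 750 * max (3 - d.getD x 0) 0 else total
    if PySem.Str.isIn "legendary" x then total + 3500 * max (legendary_need - d.getD x 0) 0 else total) 0

-- ===== PRECONDITION & SPEC =====
-- Pre_ excludes exactly the inputs on which the Python A raises KeyError: a card in the
-- set list containing a rarity substring but absent from the collection dict (B raises there too).
def Pre_calculateCollectionVialCompletionCost (mycollection : List (String × Int)) (mysetcardlist : List String) (use_1x_legendaries_limit : Bool) : Prop :=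
  ∀ x ∈ mysetcardlist,
    (PySem.Str.isIn "bronze" x || PySem.Str.isIn "silver" x || PySem.Str.isIn "gold" x || PySem.Str.isIn "legendary" x) = true →
    (PySem.Dict.mk mycollection).contains x = true
instance (mycollection : List (String × Int)) (mysetcardlist : List String) (use_1x_legendaries_limit : Bool) : Decidable (Pre_calculateCollectionVialCompletionCost mycollection mysetcardlist use_1x_legendaries_limit) := by unfold Pre_calculateCollectionVialCompletionCost; infer_instance

def pvWitness_calculateCollectionVialCompletionCost : (List (String × Int)) × List String × Bool :=
  ([("bronze card", 1), ("shiny legendary", 0)], ["bronze card", "shiny legendary", "token"], false)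

def Spec_calculateCollectionVialCompletionCost (mycollection : List (String × Int)) (mysetcardlist : List String) (use_1x_legendaries_limit : Bool) (out : Int) : Prop := out = calculateCollectionVialCompletionCost_alt mycollection mysetcardlist use_1x_legendaries_limit
instance (mycollection : List (String × Int)) (mysetcardlist : List String) (use_1x_legendaries_limit : Bool) (out : Int) : Decidable (Spec_calculateCollectionVialCompletionCost mycollection mysetcardlist use_1x_legendaries_limit out) := by unfold Spec_calculateCollectionVialCompletionCost; infer_instance

-- ===== CLAIM (what is proved, stated in full; the proofs are below) =====
def Claim_equal_calculateCollectionVialCompletionCost : Prop := ∀ (mycollection : List (String × Int)) (mysetcardlist : List String) (use_1x_legendaries_limit : Bool), Dom_calculateCollectionVialCompletionCost mycollection mysetcardlist use_1x_legendaries_limit → Pre_calculateCollectionVialCompletionCost mycollection mysetcardlist use_1x_legendaries_limit → Spec_calculateCollectionVialCompletionCost mycollection mysetcardlist use_1x_legendaries_limit (calculateCollectionVialCompletionCost mycollection mysetcardlist use_1x_legendaries_limit)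

-- ===== LEMMAS AND PROOFS =====

-- per-card contribution used as the common value both programs sum
def pvContrib (d : PySem.Dict String Int) (legendary_need : Int) (x : String) : Int :=
  (if PySem.Str.isIn "bronze" x then 50 * max (3 - d.getD x 0) 0 else 0)
  + (if PySem.Str.isIn "silver" x then 90 * max (3 - d.getD x 0) 0 else 0)
  + (if PySem.Str.isIn "gold" x then 750 * max (3 - d.getD x 0) 0 else 0)
  + (if PySem.Str.isIn "legendary" x then 3500 * max (legendary_need - d.getD x 0) 0 else 0)

-- a filtered accumulate equals a whole-list sum of guarded terms
theorem pv_foldl_filter_sum (p : String → Bool) (g : String → Int) (l : List String) (a : Int) :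
    (l.filter p).foldl (fun acc x => acc + g x) a
      = a + (l.map (fun x => if p x then g x else 0)).sum := by
  induction l generalizing a with
  | nil => simp
  | cons h t ih =>
    by_cases hp : p h = true
    · simp [hp, ih]; ring
    · simp [hp, ih]

theorem pv_alt_foldl (d : PySem.Dict String Int) (n : Int) (l : List String) (a : Int) :
    l.foldl (fun total x =>
      let total := if PySem.Str.isIn "bronze" x then total + 50 * max (3 - d.getD x 0) 0 else total
      let total := if PySem.Str.isIn "silver" x then total + 90 * max (3 - d.getD x 0) 0 else total
      let total := if PySem.Str.isIn "gold" x then total + 750 * max (3 - d.getD x 0) 0 else total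
      if PySem.Str.isIn "legendary" x then total + 3500 * max (n - d.getD x 0) 0 else total) a
      = a + (l.map (pvContrib d n)).sum := by
  induction l generalizing a with
  | nil => simp
  | cons h t ih =>
    simp only [List.foldl_cons, List.map_cons, List.sum_cons, ih, pvContrib]
    split_ifs <;> ring

-- the four guarded whole-list sums, scaled, equal one sum of per-card contributions
theorem pv_combine (d : PySem.Dict String Int) (n : Int) (l : List String) :
    50 * (l.map (fun x => if PySem.Str.isIn "bronze" x then max (3 - d.getD x 0) 0 else 0)).sum
    + 90 * (l.map (fun x => if PySem.Str.isIn "silver" x then max (3 - d.getD x 0) 0 else 0)).sum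
    + 750 * (l.map (fun x => if PySem.Str.isIn "gold" x then max (3 - d.getD x 0) 0 else 0)).sum
    + 3500 * (l.map (fun x => if PySem.Str.isIn "legendary" x then max (n - d.getD x 0) 0 else 0)).sum
    = (l.map (pvContrib d n)).sum := by
  induction l with
  | nil => simp
  | cons h t ih =>
    simp only [List.map_cons, List.sum_cons, pvContrib, mul_add]
    split_ifs <;> linarith [ih]

-- ===== VERDICT (by name: the statement is the Claim_ definition above) =====
theorem calculateCollectionVialCompletionCost_spec : Claim_equal_calculateCollectionVialCompletionCost := by
  intro mycollection mysetcardlist u _ _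
  unfold Spec_calculateCollectionVialCompletionCost
  unfold calculateCollectionVialCompletionCost calculateCollectionVialCompletionCost_alt
  simp only [pv_foldl_filter_sum, pv_alt_foldl, zero_add]
  cases u with
  | false =>
    simp only [Bool.false_eq_true, if_false]
    linarith [pv_combine (PySem.Dict.mk mycollection) 3 mysetcardlist]
  | true =>
    simp only [if_true]
    linarith [pv_combine (PySem.Dict.mk mycollection) 1 mysetcardlist]
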